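-- pv_equiv track=rewrite | github.com/PhilHarnish/forge | src/data/iter_util.py | map_common
-- ===== SOURCE A (Python) =====
-- from typing import Callable, Container, Iterable, List, Mapping, Optional, \
--   Tuple, TypeVar
--
-- T = TypeVar('T')  # Generic type.
--
-- def map_common(
--     maps: List[Mapping[str, T]],
--     whitelist: Optional[Container[str]] = None,
--     blacklist: Optional[Container[str]] = None
-- ) -> Iterable[Tuple[str, List[T]]]:
--   if not maps:
--     return []
--   if whitelist:
--     reference = whitelist
--     remaining = maps
--   else:
--     # Use smallest input map as reference.
--     sorted_maps = list(sorted(maps, key=len))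
--     reference, remaining = sorted_maps[0], sorted_maps[1:]
--   if blacklist:
--     return [
--       (key, [i[key] for i in maps])
--       for key in reference if key not in blacklist and not any(
--           key not in i for i in remaining)
--     ]
--   return [
--     (key, [i[key] for i in maps])
--     for key in reference if all(key in i for i in remaining)
--   ]
-- ===== SOURCE B (Python) =====
-- def map_common(maps, whitelist=None, blacklist=None):
--   if not maps:
--     return []
--   if whitelist:
--     reference = whitelist
--     remaining = maps
--   else:
--     sorted_maps = sorted(maps, key=len)
--     reference, remaining = sorted_maps[0], sorted_maps[1:]
--   if remaining:
--     common = set(remaining[0])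
--     for m in remaining[1:]:
--       common &= m.keys()
--   else:
--     common = None  # empty 'remaining': every reference key qualifies
--   bl = set(blacklist) if blacklist else set()
--   return [(key, [m[key] for m in maps])
--           for key in reference
--           if key not in bl and (common is None or key in common)]
-- ===== Notes on version B (the rewrite author's own statement) =====
-- stated objective: faster
-- what changed: B precomputes the set of keys common to all 'remaining' maps by intersecting their key-sets once (None meaning 'no restriction' when remaining is empty) and folds the optional blacklist into a set, so a single merged comprehension over the reference replaces A's two comprehension variants that rescan every remaining map per key with any/all generator expressions.
import Mathlib
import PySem

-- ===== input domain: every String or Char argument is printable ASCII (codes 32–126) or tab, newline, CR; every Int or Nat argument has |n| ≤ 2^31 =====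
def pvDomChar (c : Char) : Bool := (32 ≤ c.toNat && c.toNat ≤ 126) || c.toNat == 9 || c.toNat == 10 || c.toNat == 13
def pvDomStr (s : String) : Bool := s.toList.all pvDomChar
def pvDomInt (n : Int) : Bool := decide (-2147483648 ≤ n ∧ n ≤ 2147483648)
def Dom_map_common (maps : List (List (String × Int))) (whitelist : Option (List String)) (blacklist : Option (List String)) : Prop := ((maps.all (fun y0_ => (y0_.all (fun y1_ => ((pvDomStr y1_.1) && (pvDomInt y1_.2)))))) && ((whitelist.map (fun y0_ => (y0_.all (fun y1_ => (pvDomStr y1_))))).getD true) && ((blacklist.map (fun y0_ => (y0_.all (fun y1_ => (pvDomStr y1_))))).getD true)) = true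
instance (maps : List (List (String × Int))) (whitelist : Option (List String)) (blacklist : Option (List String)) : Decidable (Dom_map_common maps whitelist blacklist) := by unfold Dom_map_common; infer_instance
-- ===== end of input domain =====

-- B replaces A's per-key rescans of `remaining` with one precomputed key-set intersection
-- plus a single merged pass over the reference (objective: faster; return value only).

-- ===== PORT A =====
-- sorted_maps = list(sorted(maps, key=len)); reference, remaining = sorted_maps[0], sorted_maps[1:]
-- (the [] branch is unreachable: callers pass a non-empty list)
def pySmallestRef (ds : List (PySem.Dict String Int)) :
    List String × List (PySem.Dict String Int) :=
  match PySem.List.sorted ds (fun d => (d.size : Int)) false with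
  | [] => ([], [])
  | r :: rest => (r.keys, rest)

-- key not in blacklist and not any(key not in i for i in remaining)
def pyCondBl (bl : List String) (remaining : List (PySem.Dict String Int)) (key : String) : Bool :=
  !bl.contains key && !(remaining.any (fun d => !(d.contains key)))

-- all(key in i for i in remaining)
def pyCondAll (remaining : List (PySem.Dict String Int)) (key : String) : Bool :=
  remaining.all (fun d => d.contains key)

def map_common (maps : List (List (String × Int))) (whitelist : Option (List String)) (blacklist : Option (List String)) : List (String × List Int) :=
  if maps = [] then []
  else
    let ds := maps.map (fun m => PySem.Dict.ofList m)
    let rr : List String × List (PySem.Dict String Int) :=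
      match whitelist with
      | some wl => if wl = [] then pySmallestRef ds else (wl, ds)
      | none => pySmallestRef ds
    let emit := fun (key : String) => (key, ds.map (fun d => d.getD key 0))
    match blacklist with
    | some bl =>
      if bl = [] then (rr.1.filter (pyCondAll rr.2)).map emit
      else (rr.1.filter (pyCondBl bl rr.2)).map emit
    | none => (rr.1.filter (pyCondAll rr.2)).map emit

-- ===== PORT B =====
-- common = set(remaining[0]); for m in remaining[1:]: common &= m.keys()   (none = no remaining)
def pyInter (remaining : List (PySem.Dict String Int)) : Option (List String) :=
  match remaining with
  | [] => none
  | r :: rest =>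
    some (rest.foldl (fun s d => s.filter (fun k => d.contains k)) (PySem.Set.ofList r.keys))

-- key not in bl and (common is None or key in common)
def pyCondB (bl : List String) (common : Option (List String)) (key : String) : Bool :=
  !bl.contains key &&
    (match common with
     | none => true
     | some c => c.contains key)

def map_common_alt (maps : List (List (String × Int))) (whitelist : Option (List String)) (blacklist : Option (List String)) : List (String × List Int) :=
  if maps = [] then []
  else
    let ds := maps.map (fun m => PySem.Dict.ofList m)
    let rr : List String × List (PySem.Dict String Int) :=
      match whitelist with
      | some wl => if wl = [] then pySmallestRef ds else (wl, ds)
      | none => pySmallestRef ds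
    let common := pyInter rr.2
    let bl : List String :=
      match blacklist with
      | some b => if b = [] then [] else PySem.Set.ofList b
      | none => []
    (rr.1.filter (pyCondB bl common)).map
      (fun key => (key, ds.map (fun d => d.getD key 0)))

-- ===== PRECONDITION & SPEC =====
def Spec_map_common (maps : List (List (String × Int))) (whitelist : Option (List String)) (blacklist : Option (List String)) (out : List (String × List Int)) : Prop := out = map_common_alt maps whitelist blacklist
instance (maps : List (List (String × Int))) (whitelist : Option (List String)) (blacklist : Option (List String)) (out : List (String × List Int)) : Decidable (Spec_map_common maps whitelist blacklist out) := by unfold Spec_map_common; infer_instance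

-- ===== CLAIM (what is proved, stated in full; the proofs are below) =====
def Claim_equal_map_common : Prop := ∀ (maps : List (List (String × Int))) (whitelist : Option (List String)) (blacklist : Option (List String)), Dom_map_common maps whitelist blacklist → Spec_map_common maps whitelist blacklist (map_common maps whitelist blacklist)

-- ===== LEMMAS AND PROOFS =====

lemma mem_foldl_filter (rest : List (PySem.Dict String Int)) (s : List String) (key : String) :
    key ∈ rest.foldl (fun s d => s.filter (fun k => decide (k ∈ d.keys))) s
      ↔ key ∈ s ∧ ∀ d ∈ rest, key ∈ d.keys := by
  induction rest generalizing s with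
  | nil => simp
  | cons r rest ih =>
    simp only [List.foldl_cons, ih, List.mem_filter, List.mem_cons, decide_eq_true_eq]
    constructor
    · rintro ⟨⟨hs, hr⟩, hall⟩
      exact ⟨hs, fun d hd => hd.elim (fun h => h ▸ hr) (hall d)⟩
    · rintro ⟨hs, hall⟩
      exact ⟨⟨hs, hall r (Or.inl rfl)⟩, fun d hd => hall d (Or.inr hd)⟩

lemma condB_eq_all (remaining : List (PySem.Dict String Int)) (key : String) :
    pyCondB [] (pyInter remaining) key = pyCondAll remaining key := by
  cases remaining with
  | nil => simp [pyCondB, pyInter, pyCondAll]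
  | cons r rest =>
    simp [pyCondB, pyInter, pyCondAll, PySem.Dict.contains_eq_decide_mem_keys,
      mem_foldl_filter, PySem.Set.mem_ofList]
    rw [Bool.eq_iff_iff]
    simp

lemma condB_eq_bl (bl : List String) (remaining : List (PySem.Dict String Int)) (key : String) :
    pyCondB (PySem.Set.ofList bl) (pyInter remaining) key = pyCondBl bl remaining key := by
  cases remaining with
  | nil => simp [pyCondB, pyInter, pyCondBl, PySem.Set.mem_ofList]
  | cons r rest =>
    simp [pyCondB, pyInter, pyCondBl, PySem.Dict.contains_eq_decide_mem_keys,
      mem_foldl_filter, PySem.Set.mem_ofList]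
    rw [Bool.eq_iff_iff]
    simp

-- ===== VERDICT (by name: the statement is the Claim_ definition above) =====
theorem map_common_spec : Claim_equal_map_common := by
  intro maps whitelist blacklist _
  unfold Spec_map_common map_common map_common_alt
  by_cases hm : maps = []
  · simp [hm]
  · simp only [hm, if_false]
    cases blacklist with
    | none =>
      simp only []
      congr 1
      exact List.filter_congr (fun k _ => (condB_eq_all _ k).symm)
    | some bl =>
      by_cases hb : bl = []
      · simp only [hb, ite_true]
        congr 1
        exact List.filter_congr (fun k _ => (condB_eq_all _ k).symm)
      · simp only [if_neg hb]
        congr 1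
        exact List.filter_congr (fun k _ => (condB_eq_bl bl _ k).symm)
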